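-- pv_equiv track=rewrite | github.com/dickymoore/macs | tools/orchestration/release_gate.py | summarize_outcomes
-- ===== SOURCE A (Python) =====
-- def summarize_outcomes(outcomes) -> str:
--     ordered = list(outcomes)
--     if any(item == "BLOCKED" for item in ordered):
--         return "BLOCKED"
--     if any(item == "FAIL" for item in ordered):
--         return "FAIL"
--     if any(item == "PARTIAL" for item in ordered):
--         return "PARTIAL"
--     return "PASS"
-- ===== SOURCE B (Python) =====
-- _PRI = {"BLOCKED": 0, "FAIL": 1, "PARTIAL": 2}
-- _TABLE = ["BLOCKED", "FAIL", "PARTIAL", "PASS"]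
--
-- def summarize_outcomes(outcomes) -> str:
--     best = min((_PRI[x] for x in outcomes if x in _PRI), default=3)
--     return _TABLE[best]
-- ===== Notes on version B (the rewrite author's own statement) =====
-- stated objective: simpler
-- what changed: Replaced the three ordered any-scans with a single min-reduction over a priority lookup table, then one table lookup.
import Mathlib
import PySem

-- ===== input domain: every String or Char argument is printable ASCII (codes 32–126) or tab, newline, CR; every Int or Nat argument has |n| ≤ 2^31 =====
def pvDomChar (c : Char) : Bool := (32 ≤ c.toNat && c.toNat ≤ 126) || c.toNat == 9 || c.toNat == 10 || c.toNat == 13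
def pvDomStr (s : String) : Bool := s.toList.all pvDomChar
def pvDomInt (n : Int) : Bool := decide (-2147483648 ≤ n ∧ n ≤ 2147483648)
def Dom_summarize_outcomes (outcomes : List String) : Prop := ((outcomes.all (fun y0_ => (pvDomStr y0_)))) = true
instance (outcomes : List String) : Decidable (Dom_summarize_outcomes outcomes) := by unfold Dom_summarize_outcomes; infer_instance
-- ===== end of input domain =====

-- B replaces A's three ordered any-scans with one min-reduction over a priority table (simpler, one pass).

-- ===== PORT A =====
def summarize_outcomes (outcomes : List String) : String :=
  let ordered := outcomes
  if ordered.any (fun item => item == "BLOCKED") then "BLOCKED"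
  else if ordered.any (fun item => item == "FAIL") then "FAIL"
  else if ordered.any (fun item => item == "PARTIAL") then "PARTIAL"
  else "PASS"

-- ===== PORT B =====
def pvPri : PySem.Dict String Nat := PySem.Dict.ofList [("BLOCKED", 0), ("FAIL", 1), ("PARTIAL", 2)]
def pvTable : List String := ["BLOCKED", "FAIL", "PARTIAL", "PASS"]

-- min((_PRI[x] for x in outcomes if x in _PRI), default=3) as a fold over the filtered lookups
def summarize_outcomes_alt (outcomes : List String) : String :=
  let best := outcomes.foldl
    (fun b x => match PySem.Dict.get? pvPri x with
      | some p => min b p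
      | none => b) 3
  pvTable.getD best "PASS"

-- ===== PRECONDITION & SPEC =====
def Spec_summarize_outcomes (outcomes : List String) (out : String) : Prop := out = summarize_outcomes_alt outcomes
instance (outcomes : List String) (out : String) : Decidable (Spec_summarize_outcomes outcomes out) := by unfold Spec_summarize_outcomes; infer_instance

-- ===== CLAIM (what is proved, stated in full; the proofs are below) =====
def Claim_equal_summarize_outcomes : Prop := ∀ (outcomes : List String), Dom_summarize_outcomes outcomes → Spec_summarize_outcomes outcomes (summarize_outcomes outcomes)

-- ===== LEMMAS AND PROOFS =====

-- the value A's scans pick, as a priority level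
def pvLevel (l : List String) : Nat :=
  if "BLOCKED" ∈ l then 0 else if "FAIL" ∈ l then 1 else if "PARTIAL" ∈ l then 2 else 3

theorem pvFold_char (l : List String) (b : Nat) (hb : b ≤ 3) :
    l.foldl (fun b x => match PySem.Dict.get? pvPri x with
      | some p => min b p
      | none => b) b = min b (pvLevel l) := by
  induction l generalizing b with
  | nil => simp [pvLevel]; omega
  | cons x xs ih =>
    simp only [List.foldl_cons]
    by_cases hB : x = "BLOCKED"
    · subst hB
      rw [show PySem.Dict.get? pvPri "BLOCKED" = some 0 from rfl]
      rw [ih (min b 0) (by omega)]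
      simp only [pvLevel, List.mem_cons, true_or, if_pos]
      by_cases h1 : "BLOCKED" ∈ xs <;> by_cases h2 : "FAIL" ∈ xs <;>
        by_cases h3 : "PARTIAL" ∈ xs <;> simp [h1, h2, h3]
    · by_cases hF : x = "FAIL"
      · subst hF
        rw [show PySem.Dict.get? pvPri "FAIL" = some 1 from rfl]
        rw [ih (min b 1) (by omega)]
        simp only [pvLevel, List.mem_cons]
        by_cases h1 : "BLOCKED" ∈ xs <;> by_cases h2 : "FAIL" ∈ xs <;>
          by_cases h3 : "PARTIAL" ∈ xs <;> simp [h1, h2, h3]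
      · by_cases hP : x = "PARTIAL"
        · subst hP
          rw [show PySem.Dict.get? pvPri "PARTIAL" = some 2 from rfl]
          rw [ih (min b 2) (by omega)]
          simp only [pvLevel, List.mem_cons]
          by_cases h1 : "BLOCKED" ∈ xs <;> by_cases h2 : "FAIL" ∈ xs <;>
            by_cases h3 : "PARTIAL" ∈ xs <;> simp [h1, h2, h3]
        · have hit : pvPri.items = [("BLOCKED", 0), ("FAIL", 1), ("PARTIAL", 2)] := rfl
          have e1 : ("BLOCKED" == x) = false := by simp [Ne.symm hB]
          have e2 : ("FAIL" == x) = false := by simp [Ne.symm hF]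
          have e3 : ("PARTIAL" == x) = false := by simp [Ne.symm hP]
          have hnone : PySem.Dict.get? pvPri x = none := by
            simp [PySem.Dict.get?, hit, List.find?, e1, e2, e3]
          rw [hnone, ih b hb]
          simp [pvLevel, List.mem_cons, Ne.symm hB, Ne.symm hF, Ne.symm hP]

-- ===== VERDICT (by name: the statement is the Claim_ definition above) =====
theorem summarize_outcomes_spec : Claim_equal_summarize_outcomes := by
  intro outcomes _
  unfold Spec_summarize_outcomes summarize_outcomes summarize_outcomes_alt
  rw [pvFold_char outcomes 3 (le_refl 3)]
  by_cases h1 : "BLOCKED" ∈ outcomes <;> by_cases h2 : "FAIL" ∈ outcomes <;>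
    by_cases h3 : "PARTIAL" ∈ outcomes <;>
    simp [pvLevel, pvTable, h1, h2, h3, List.any_eq_true]
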